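-- pv_equiv track=rewrite | github.com/ripR0ACH/CS_313E | T1/FuzzyAnagram.py | is_fuzzy_anagram
-- ===== SOURCE A (Python) =====
-- def is_fuzzy_anagram(word1, word2, k):
--     letter = 0
--     if len(word2) - len(word1) > k:
--         return False
--     while letter < len(word2):
--         if word2[letter] in word1:
--             word1 = word1.replace(word2[letter], '', 1)
--         letter += 1
--     return len(word1) <= k
-- ===== SOURCE B (Python) =====
-- def is_fuzzy_anagram(word1, word2, k):
--     if len(word2) - len(word1) > k:
--         return False
--     a = sorted(word1)
--     b = sorted(word2)
--     i = j = matched = 0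
--     while i < len(a) and j < len(b):
--         if a[i] == b[j]:
--             matched += 1
--             i += 1
--             j += 1
--         elif a[i] < b[j]:
--             i += 1
--         else:
--             j += 1
--     return len(word1) - matched <= k
-- ===== Notes on version B (the rewrite author's own statement) =====
-- stated objective: faster
-- what changed: Replaces A's greedy per-character membership/replace removal from a mutable string with sorting both words and counting the multiset intersection in one two-pointer merge pass.
import Mathlib
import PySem

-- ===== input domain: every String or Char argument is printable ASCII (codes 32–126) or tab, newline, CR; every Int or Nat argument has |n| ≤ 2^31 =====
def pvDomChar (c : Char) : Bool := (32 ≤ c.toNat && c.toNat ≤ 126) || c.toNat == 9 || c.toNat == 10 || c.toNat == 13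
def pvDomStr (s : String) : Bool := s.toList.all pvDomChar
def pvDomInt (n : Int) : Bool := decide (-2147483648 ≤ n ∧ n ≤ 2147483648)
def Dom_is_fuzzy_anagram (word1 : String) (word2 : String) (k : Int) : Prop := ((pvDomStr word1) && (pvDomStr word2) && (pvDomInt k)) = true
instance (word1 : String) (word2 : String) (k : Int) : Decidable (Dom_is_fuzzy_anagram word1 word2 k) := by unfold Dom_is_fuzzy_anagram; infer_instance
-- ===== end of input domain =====

-- B sorts both words and counts the multiset intersection in one two-pointer merge
-- pass instead of A's repeated membership/replace removal from a mutable string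
-- (objective: faster, sort+merge vs A's scan-and-rebuild per character).


-- ===== PORT A =====
-- `word1.replace(c, '', 1)` for a single char c removes the first occurrence of c:
-- on List Char this is exactly List.erase (the guard `c ∈ word1` matches Python's `in`).
def pvAStep (w1 : List Char) (c : Char) : List Char :=
  if c ∈ w1 then w1.erase c else w1

def is_fuzzy_anagram (word1 : String) (word2 : String) (k : Int) : Bool :=
  if (word2.toList.length : Int) - (word1.toList.length : Int) > k then false
  else
    -- while loop over word2's characters in order, mutating word1
    let w1 := word2.toList.foldl pvAStep word1.toList
    decide ((w1.length : Int) ≤ k)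

-- ===== PORT B =====
-- two-pointer merge over the two sorted lists, counting equal heads (B's while loop)
def pvMerge : List Char → List Char → Int
  | [], _ => 0
  | _ :: _, [] => 0
  | a :: xs, b :: ys =>
      if a = b then 1 + pvMerge xs ys
      else if a < b then pvMerge xs (b :: ys)
      else pvMerge (a :: xs) ys
  termination_by xs ys => xs.length + ys.length

def is_fuzzy_anagram_alt (word1 : String) (word2 : String) (k : Int) : Bool :=
  if (word2.toList.length : Int) - (word1.toList.length : Int) > k then false
  else
    let a := PySem.List.sorted word1.toList (fun x => x) false
    let b := PySem.List.sorted word2.toList (fun x => x) false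
    decide ((word1.toList.length : Int) - pvMerge a b ≤ k)

-- ===== PRECONDITION & SPEC =====
def Spec_is_fuzzy_anagram (word1 : String) (word2 : String) (k : Int) (out : Bool) : Prop := out = is_fuzzy_anagram_alt word1 word2 k
instance (word1 : String) (word2 : String) (k : Int) (out : Bool) : Decidable (Spec_is_fuzzy_anagram word1 word2 k out) := by unfold Spec_is_fuzzy_anagram; infer_instance

-- ===== CLAIM =====
def Claim_equal_is_fuzzy_anagram : Prop := ∀ (word1 : String) (word2 : String) (k : Int), Dom_is_fuzzy_anagram word1 word2 k → Spec_is_fuzzy_anagram word1 word2 k (is_fuzzy_anagram word1 word2 k)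

-- ===== LEMMAS AND PROOFS =====

-- A's loop, as a multiset, computes the multiset difference word1 - word2.
lemma pvA_multiset (w2 w1 : List Char) :
    ((w2.foldl pvAStep w1 : List Char) : Multiset Char) = (↑w1 : Multiset Char) - ↑w2 := by
  induction w2 generalizing w1 with
  | nil => simp
  | cons c w2 ih =>
    simp only [List.foldl_cons]
    rw [ih]
    have hstep : ((pvAStep w1 c : List Char) : Multiset Char) = (↑w1 : Multiset Char).erase c := by
      by_cases hc : c ∈ w1
      · simp [pvAStep, hc]
      · simp [pvAStep, hc, Multiset.erase_of_notMem]
    rw [hstep, show ((c :: w2 : List Char) : Multiset Char) = c ::ₘ ↑w2 from rfl,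
        Multiset.sub_cons]

-- B's merge on two (≤)-sorted lists counts the cardinality of the multiset intersection.
lemma pvMerge_inter (xs ys : List Char)
    (hx : xs.Pairwise (· ≤ ·)) (hy : ys.Pairwise (· ≤ ·)) :
    pvMerge xs ys = (((↑xs : Multiset Char) ∩ ↑ys).card : Int) := by
  induction xs generalizing ys with
  | nil => simp [pvMerge]
  | cons a xs ihx =>
    induction ys with
    | nil => simp [pvMerge]
    | cons b ys ihy =>
      have hx' := List.Pairwise.of_cons hx
      have hy' := List.Pairwise.of_cons hy
      by_cases hab : a = b
      · subst hab
        rw [show pvMerge (a :: xs) (a :: ys) = 1 + pvMerge xs ys by simp [pvMerge]]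
        rw [ihx ys hx' hy']
        rw [show ((a :: xs : List Char) : Multiset Char) = a ::ₘ ↑xs from rfl,
            Multiset.cons_inter_of_pos _ (by simp : a ∈ ((a :: ys : List Char) : Multiset Char))]
        simp
        omega
      · by_cases hlt : a < b
        · -- a < every element of b :: ys, so a ∉ b :: ys
          have hna : a ∉ ((b :: ys : List Char) : Multiset Char) := by
            simp only [Multiset.mem_coe, List.mem_cons]
            rintro (h | h)
            · exact hab h
            · have := (List.pairwise_cons.mp hy).1 a h
              exact absurd hlt (not_lt.mpr this)
          rw [show pvMerge (a :: xs) (b :: ys) = pvMerge xs (b :: ys) by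
                simp [pvMerge, hab, hlt]]
          rw [ihx (b :: ys) hx' hy]
          rw [show ((a :: xs : List Char) : Multiset Char) = a ::ₘ ↑xs from rfl,
              Multiset.cons_inter_of_neg _ hna]
        · -- b < a ≤ every element of a :: xs, so b ∉ a :: xs
          have hba : b < a := lt_of_le_of_ne (not_lt.mp hlt) (Ne.symm hab)
          have hnb : b ∉ ((a :: xs : List Char) : Multiset Char) := by
            simp only [Multiset.mem_coe, List.mem_cons]
            rintro (h | h)
            · exact hab h.symm
            · have := (List.pairwise_cons.mp hx).1 b h
              exact absurd hba (not_lt.mpr this)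
          rw [show pvMerge (a :: xs) (b :: ys) = pvMerge (a :: xs) ys by
                simp [pvMerge, hab, hlt]]
          rw [ihy hy',
              show ((b :: ys : List Char) : Multiset Char) = b ::ₘ ↑ys from rfl,
              Multiset.inter_comm ((a :: xs : List Char) : Multiset Char) (b ::ₘ (↑ys : Multiset Char)),
              Multiset.cons_inter_of_neg _ hnb, Multiset.inter_comm]

-- ===== VERDICT =====
theorem is_fuzzy_anagram_spec : Claim_equal_is_fuzzy_anagram := by
  intro word1 word2 k _
  unfold Spec_is_fuzzy_anagram is_fuzzy_anagram is_fuzzy_anagram_alt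
  by_cases hg : (word2.toList.length : Int) - (word1.toList.length : Int) > k
  · rw [if_pos hg, if_pos hg]
  · simp only [if_neg hg]
    have hA : ((word2.toList.foldl pvAStep word1.toList).length : Int)
        = (((↑word1.toList : Multiset Char) - ↑word2.toList).card : Int) := by
      rw [← Multiset.coe_card, pvA_multiset]
    have hsa := PySem.List.sorted_perm word1.toList (fun x => x) false
    have hsb := PySem.List.sorted_perm word2.toList (fun x => x) false
    have hB : pvMerge (PySem.List.sorted word1.toList (fun x => x) false)
                      (PySem.List.sorted word2.toList (fun x => x) false)
        = (((↑word1.toList : Multiset Char) ∩ ↑word2.toList).card : Int) := by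
      rw [pvMerge_inter _ _ (PySem.List.sorted_pairwise _ _) (PySem.List.sorted_pairwise _ _),
          Multiset.coe_eq_coe.mpr hsa, Multiset.coe_eq_coe.mpr hsb]
    have hcard : ((↑word1.toList : Multiset Char) - ↑word2.toList).card
        + ((↑word1.toList : Multiset Char) ∩ ↑word2.toList).card
        = word1.toList.length := by
      rw [← Multiset.card_add, Multiset.sub_add_inter, Multiset.coe_card]
    rw [decide_eq_decide, hA, hB]
    omega
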